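-- pv_equiv track=rewrite | github.com/CDBiddulph/scaffold-learning | experiments/keep_crosswords_20250711_195402/scaffolds/17/scaffold.py | format_clue_solutions
-- ===== SOURCE A (Python) =====
-- def format_clue_solutions(solutions):
--     """Format the clue solutions for the prompt"""
--     across_solutions = []
--     down_solutions = []
--
--     for clue_num, (section, answer) in solutions.items():
--         if section == 'Across':
--             across_solutions.append(f"{clue_num}. {answer}")
--         else:
--             down_solutions.append(f"{clue_num}. {answer}")
--
--     result = []
--     if across_solutions:
--         result.append("Across:")
--         result.extend(sorted(across_solutions, key=lambda x: int(x.split('.')[0])))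
--     if down_solutions:
--         result.append("Down:")
--         result.extend(sorted(down_solutions, key=lambda x: int(x.split('.')[0])))
--
--     return '\n'.join(result)
-- ===== SOURCE B (Python) =====
-- def format_clue_solutions(solutions):
--     """Format the clue solutions for the prompt"""
--     # One sort by the compound key (down-flag, clue number); the int(str(...).split('.')[0])
--     # key is the numeric key A uses.  Headers are emitted on section change in a single pass.
--     ordered = sorted(solutions.items(),
--                      key=lambda kv: (kv[1][0] != 'Across',
--                                      int(str(kv[0]).split('.')[0])))
--     result = []
--     prev = None
--     for num, (section, answer) in ordered:
--         is_across = section == 'Across'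
--         if prev != is_across:
--             result.append("Across:" if is_across else "Down:")
--             prev = is_across
--         result.append(f"{num}. {answer}")
--     return '\n'.join(result)
-- ===== Notes on version B (the rewrite author's own statement) =====
-- stated objective: alternative
-- what changed: A partitions items into across/down line lists and sorts each list separately; B never partitions: it sorts the items ONCE by the compound key (section != 'Across', clue number) and emits the output in a single pass, inserting a section header whenever the section flag changes.
import Mathlib
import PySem

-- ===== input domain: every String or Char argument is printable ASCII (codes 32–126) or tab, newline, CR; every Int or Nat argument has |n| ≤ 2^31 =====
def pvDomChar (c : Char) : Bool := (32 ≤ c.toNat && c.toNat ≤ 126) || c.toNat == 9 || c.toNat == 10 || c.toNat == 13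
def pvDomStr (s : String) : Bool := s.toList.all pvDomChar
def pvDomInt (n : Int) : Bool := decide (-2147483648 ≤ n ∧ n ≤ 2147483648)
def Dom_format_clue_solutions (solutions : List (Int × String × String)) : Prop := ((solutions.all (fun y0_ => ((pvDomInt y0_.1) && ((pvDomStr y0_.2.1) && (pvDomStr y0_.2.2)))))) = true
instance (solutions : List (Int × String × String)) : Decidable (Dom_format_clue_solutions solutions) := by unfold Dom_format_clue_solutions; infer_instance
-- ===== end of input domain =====

-- B sorts the dict items ONCE by the compound key (down-flag, clue number) and emits the output in a
-- single pass, inserting a header when the section changes — instead of A's partition-then-two-sorts.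
-- A different decomposition, not claimed faster (objective: "alternative").


-- ===== PORT A =====
-- f"{clue_num}. {answer}"  (clue_num is the dict's int key) — the f-string both sources contain
def pvFmt (it : Int × String × String) : String := PySem.Int.toStr it.1 ++ ". " ++ it.2.2
-- A's sort key  lambda x: int(x.split('.')[0])  on the formatted line.
-- sep '.' is nonempty so split? is some; splitOn never returns [], so [0] never raises;
-- int() never raises: the piece before the first '.' is str(clue_num).
def pvKey (x : String) : Int := (PySem.Int.ofStr? (((PySem.Str.split? x ".").getD []).headD "")).getD 0

def format_clue_solutions (solutions : List (Int × String × String)) : String :=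
  -- for clue_num, (section, answer) in solutions.items(): append to across/down
  let pair := (PySem.Dict.ofList solutions).items.foldl
    (fun (p : List String × List String) it =>
      if it.2.1 == "Across" then (p.1 ++ [pvFmt it], p.2) else (p.1, p.2 ++ [pvFmt it]))
    ([], [])
  let result : List String := []
  let result := if pair.1.isEmpty then result
                else result ++ ["Across:"] ++ PySem.List.sorted pair.1 pvKey false
  let result := if pair.2.isEmpty then result
                else result ++ ["Down:"] ++ PySem.List.sorted pair.2 pvKey false
  PySem.Str.join "\n" result

-- ===== PORT B =====
-- kv[1][0] != 'Across'  as the primary key (Python bool: False = 0 < True = 1)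
def pvFlagB (it : Int × String × String) : Int := if it.2.1 == "Across" then 0 else 1
-- int(str(kv[0]).split('.')[0])  — the numeric secondary key of Source B
def pvKeyNum (n : Int) : Int :=
  (PySem.Int.ofStr? (((PySem.Str.split? (PySem.Int.toStr n) ".").getD []).headD "")).getD 0
-- the body of Source B's output loop: header on section change, then the line
def pvStep (st : List String × Option Bool) (it : Int × String × String) : List String × Option Bool :=
  let isA : Bool := it.2.1 == "Across"
  let st := if st.2 ≠ some isA
            then (st.1 ++ [if isA then "Across:" else "Down:"], some isA)
            else st
  (st.1 ++ [pvFmt it], st.2)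

def format_clue_solutions_alt (solutions : List (Int × String × String)) : String :=
  let ordered := PySem.List.sorted2 (PySem.Dict.ofList solutions).items
                   pvFlagB (fun kv => pvKeyNum kv.1) false   -- ONE sort, tuple key
  let res := ordered.foldl pvStep ([], none)                 -- single output pass
  PySem.Str.join "\n" res.1

-- ===== PRECONDITION & SPEC =====
def Spec_format_clue_solutions (solutions : List (Int × String × String)) (out : String) : Prop := out = format_clue_solutions_alt solutions
instance (solutions : List (Int × String × String)) (out : String) : Decidable (Spec_format_clue_solutions solutions out) := by unfold Spec_format_clue_solutions; infer_instance

-- ===== CLAIM (what is proved, stated in full; the proofs are below) =====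
def Claim_equal_format_clue_solutions : Prop := ∀ (solutions : List (Int × String × String)), Dom_format_clue_solutions solutions → Spec_format_clue_solutions solutions (format_clue_solutions solutions)

-- ===== LEMMAS AND PROOFS =====

-- ---- strings: the piece of a formatted line before its first '.' is str(clue_num) ----

-- splitOn.go pulls its accumulator out in front
theorem pv_go_acc (fuel : Nat) (l cur : List Char) (acc : List (List Char)) :
    PySem.Chars.splitOn.go ['.'] fuel l cur acc
      = acc.reverse ++ PySem.Chars.splitOn.go ['.'] fuel l cur [] := by
  induction fuel generalizing l cur acc with
  | zero => simp [PySem.Chars.splitOn.go]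
  | succ f ih =>
      cases l with
      | nil => simp [PySem.Chars.splitOn.go]
      | cons c rest =>
          by_cases h : List.isPrefixOf ['.'] (c :: rest)
          · rw [PySem.Chars.splitOn.go, if_pos h, PySem.Chars.splitOn.go, if_pos h]
            rw [ih _ _ (cur.reverse :: acc), ih _ _ ([cur.reverse])]
            simp
          · rw [PySem.Chars.splitOn.go, if_neg h, PySem.Chars.splitOn.go, if_neg h]
            exact ih _ _ _

-- no separator in l: a single piece
theorem pv_go_nosep (fuel : Nat) (l cur : List Char) (acc : List (List Char))
    (hl : '.' ∉ l) (hf : l.length < fuel) :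
    PySem.Chars.splitOn.go ['.'] fuel l cur acc = ((cur.reverse ++ l) :: acc).reverse := by
  induction fuel generalizing l cur with
  | zero => omega
  | succ f ih =>
      cases l with
      | nil => simp [PySem.Chars.splitOn.go]
      | cons c rest =>
          have hne : c ≠ '.' := fun h => hl (by simp [h])
          have hc : ¬ List.isPrefixOf ['.'] (c :: rest) = true := by
            simp [List.isPrefixOf]; intro h; exact hne h.symm
          rw [PySem.Chars.splitOn.go, if_neg hc]
          rw [ih rest (c :: cur) (fun h => hl (List.mem_cons_of_mem _ h)) (by simpa using Nat.lt_of_succ_lt_succ hf)]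
          simp

-- consume a dot-free prefix cs up to the first '.'
theorem pv_go_sep (cs : List Char) (fuel : Nat) (rest cur : List Char) (acc : List (List Char))
    (hc : '.' ∉ cs) (hf : cs.length < fuel) :
    PySem.Chars.splitOn.go ['.'] fuel (cs ++ '.' :: rest) cur acc
      = PySem.Chars.splitOn.go ['.'] (fuel - (cs.length + 1)) rest [] ((cur.reverse ++ cs) :: acc) := by
  induction cs generalizing fuel cur with
  | nil =>
      cases fuel with
      | zero => omega
      | succ f =>
          have hp : List.isPrefixOf ['.'] ('.' :: rest) = true := by simp [List.isPrefixOf]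
          rw [List.nil_append, PySem.Chars.splitOn.go, if_pos hp]
          simp
  | cons c cs' ih =>
      cases fuel with
      | zero => omega
      | succ f =>
          have hne : c ≠ '.' := fun h => hc (by simp [h])
          have hp : ¬ List.isPrefixOf ['.'] (c :: (cs' ++ '.' :: rest)) = true := by
            simp [List.isPrefixOf]; intro h; exact hne h.symm
          rw [List.cons_append, PySem.Chars.splitOn.go, if_neg hp]
          rw [ih f (c :: cur) (fun h => hc (List.mem_cons_of_mem _ h)) (by simpa using Nat.lt_of_succ_lt_succ hf)]
          have hfuel : f - (cs'.length + 1) = f + 1 - ((c :: cs').length + 1) := by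
            simp
          have hacc : (c :: cur).reverse ++ cs' = cur.reverse ++ (c :: cs') := by simp
          rw [hfuel, hacc]

theorem pv_splitOn_nosep (cs : List Char) (hc : '.' ∉ cs) :
    PySem.Chars.splitOn cs ['.'] = [cs] := by
  rw [PySem.Chars.splitOn, pv_go_nosep _ _ _ _ hc (by omega)]
  simp

theorem pv_splitOn_head (cs rest : List Char) (hc : '.' ∉ cs) :
    PySem.Chars.splitOn (cs ++ '.' :: rest) ['.']
      = cs :: PySem.Chars.splitOn.go ['.'] (rest.length + 1) rest [] [] := by
  rw [PySem.Chars.splitOn, pv_go_sep cs _ _ _ _ hc (by simp)]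
  rw [pv_go_acc]
  have : (cs ++ '.' :: rest).length + 1 - (cs.length + 1) = rest.length + 1 := by simp
  rw [this]; simp

theorem pv_digitChar_ne_dot (m : Nat) : Nat.digitChar m ≠ '.' := by
  by_cases h : m < 16
  · interval_cases m <;> decide
  · have h16 : Nat.digitChar m = '*' := by
      rw [Nat.digitChar]
      rw [if_neg (by omega), if_neg (by omega), if_neg (by omega), if_neg (by omega),
          if_neg (by omega), if_neg (by omega), if_neg (by omega), if_neg (by omega),
          if_neg (by omega), if_neg (by omega), if_neg (by omega), if_neg (by omega),
          if_neg (by omega), if_neg (by omega), if_neg (by omega), if_neg (by omega)]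
    rw [h16]; decide

theorem pv_dot_not_mem_toDigitsCore (fuel n : Nat) (ds : List Char) (hds : '.' ∉ ds) :
    '.' ∉ Nat.toDigitsCore 10 fuel n ds := by
  induction fuel generalizing n ds with
  | zero => simpa [Nat.toDigitsCore] using hds
  | succ f ih =>
      rw [Nat.toDigitsCore]
      have hd : '.' ∉ (n % 10).digitChar :: ds := by
        intro h
        rcases List.mem_cons.mp h with h | h
        · exact pv_digitChar_ne_dot _ h.symm
        · exact hds h
      split
      · exact hd
      · exact ih _ _ hd

theorem pv_dot_not_mem_toChars (n : Int) : '.' ∉ PySem.Int.toChars n := by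
  rw [PySem.Int.toChars]
  split
  · intro h
    rcases List.mem_cons.mp h with h | h
    · exact absurd h.symm (by decide)
    · exact pv_dot_not_mem_toDigitsCore _ _ _ (by simp) h
  · exact pv_dot_not_mem_toDigitsCore _ _ _ (by simp)

-- the two sort keys agree: int(f"{n}. {ans}".split('.')[0]) = int(str(n).split('.')[0])
theorem pv_key_fmt (it : Int × String × String) : pvKey (pvFmt it) = pvKeyNum it.1 := by
  unfold pvKey pvKeyNum pvFmt
  have hdot := pv_dot_not_mem_toChars it.1
  have h1 : (PySem.Int.toStr it.1 ++ ". " ++ it.2.2).toList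
      = PySem.Int.toChars it.1 ++ '.' :: ' ' :: it.2.2.toList := by
    rw [String.toList_append, String.toList_append, PySem.Int.toList_toStr]
    simp [show (". " : String).toList = ['.', ' '] from by decide]
  rw [PySem.Str.split?, PySem.Str.split?, h1, PySem.Int.toList_toStr]
  have hsep : (("." : String).toList) = ['.'] := by decide
  rw [hsep]
  rw [PySem.Chars.split?, PySem.Chars.split?]
  simp only [List.isEmpty_cons, if_neg (by decide : ¬ (false = true))]
  rw [pv_splitOn_head _ _ hdot, pv_splitOn_nosep _ hdot]
  simp [PySem.Int.ofStr?_ofList]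

-- ---- sorting: insertBy plumbing ----

theorem pv_insertBy_congr {α : Type} (b1 b2 : α → α → Bool) (x : α) (l : List α)
    (h : ∀ y ∈ l, b1 x y = b2 x y) : PySem.List.insertBy b1 x l = PySem.List.insertBy b2 x l := by
  induction l with
  | nil => rfl
  | cons y ys ih =>
      have hy := h y (by simp)
      by_cases hb : b1 x y = true
      · simp [PySem.List.insertBy, hb, hy ▸ hb]
      · have hb2 : ¬ b2 x y = true := by rw [← hy]; exact hb
        simp [PySem.List.insertBy, hb, hb2, ih (fun z hz => h z (by simp [hz]))]

theorem pv_insertBy_append_left {α : Type} (bef : α → α → Bool) (x : α) (A B : List α)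
    (hB : ∀ b ∈ B, bef x b = true) :
    PySem.List.insertBy bef x (A ++ B) = PySem.List.insertBy bef x A ++ B := by
  induction A with
  | nil =>
      cases B with
      | nil => rfl
      | cons b B' => simp [PySem.List.insertBy, hB b (by simp)]
  | cons a A' ih =>
      by_cases hb : bef x a = true
      · simp [PySem.List.insertBy, hb]
      · simp [PySem.List.insertBy, hb, ih]

theorem pv_insertBy_append_right {α : Type} (bef : α → α → Bool) (x : α) (A B : List α)
    (hA : ∀ a ∈ A, bef x a = false) :
    PySem.List.insertBy bef x (A ++ B) = A ++ PySem.List.insertBy bef x B := by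
  induction A with
  | nil => rfl
  | cons a A' ih =>
      have ha : ¬ bef x a = true := by simp [hA a (by simp)]
      simp [PySem.List.insertBy, ha, ih (fun z hz => hA z (by simp [hz]))]

-- equal keys on the list ⇒ equal stable sorts
theorem pv_sorted_key_congr {α : Type} (k1 k2 : α → Int) (xs : List α)
    (h : ∀ x ∈ xs, k1 x = k2 x) :
    PySem.List.sorted xs k1 false = PySem.List.sorted xs k2 false := by
  rw [PySem.List.sorted_eq_foldl_insertBy, PySem.List.sorted_eq_foldl_insertBy]
  suffices H : ∀ (ys : List α) (acc : List α), (∀ x ∈ ys, k1 x = k2 x) → (∀ x ∈ acc, k1 x = k2 x) →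
      ys.foldl (fun acc x => PySem.List.insertBy (fun a b => decide (k1 a < k1 b)) x acc) acc
        = ys.foldl (fun acc x => PySem.List.insertBy (fun a b => decide (k2 a < k2 b)) x acc) acc by
    exact H xs [] h (by simp)
  intro ys
  induction ys with
  | nil => intro acc _ _; rfl
  | cons y ys ih =>
      intro acc hy hacc
      rw [List.foldl_cons, List.foldl_cons]
      rw [pv_insertBy_congr _ _ y acc (fun z hz => by rw [hy y (by simp), hacc z hz])]
      exact ih _ (fun z hz => hy z (by simp [hz]))
        (fun z hz => by
          rcases (PySem.List.mem_insertBy _ _ _ _).mp hz with h' | h'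
          · rw [h']; exact hy y (by simp)
          · exact hacc z h')

-- mapping over a stable sort whose key factors through the map
theorem pv_insertBy_map {α β κ : Type} [LT κ] [DecidableLT κ] (g : α → β) (k : β → κ)
    (x : α) (acc : List α) :
    (PySem.List.insertBy (fun a b => decide (k (g a) < k (g b))) x acc).map g
      = PySem.List.insertBy (fun a b => decide (k a < k b)) (g x) (acc.map g) := by
  induction acc with
  | nil => simp [PySem.List.insertBy]
  | cons y ys ih =>
      by_cases h : k (g x) < k (g y) <;> simp [PySem.List.insertBy, h, ih]

theorem pv_foldl_insertBy_map {α β κ : Type} [LT κ] [DecidableLT κ] (g : α → β) (k : β → κ)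
    (xs : List α) (acc : List α) :
    (xs.foldl (fun acc x => PySem.List.insertBy (fun a b => decide (k (g a) < k (g b))) x acc) acc).map g
      = (xs.map g).foldl (fun acc x => PySem.List.insertBy (fun a b => decide (k a < k b)) x acc) (acc.map g) := by
  induction xs generalizing acc with
  | nil => simp
  | cons x xs ih => simp [List.foldl_cons, ih, pv_insertBy_map]

theorem pv_sorted_map {α β κ : Type} [LT κ] [DecidableLT κ] (g : α → β) (k : β → κ) (xs : List α) :
    (PySem.List.sorted xs (fun a => k (g a)) false).map g
      = PySem.List.sorted (xs.map g) k false := by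
  rw [PySem.List.sorted_eq_foldl_insertBy, PySem.List.sorted_eq_foldl_insertBy]
  simpa using pv_foldl_insertBy_map g k xs []

-- a two-valued primary key splits sorted2 into the two groups' stable sorts, concatenated
theorem pv_sorted2_split {α : Type} (k1 k2 : α → Int) (xs : List α)
    (h : ∀ x ∈ xs, k1 x = 0 ∨ k1 x = 1) :
    PySem.List.sorted2 xs k1 k2 false
      = PySem.List.sorted (xs.filter (fun x => k1 x == 0)) k2 false
        ++ PySem.List.sorted (xs.filter (fun x => !(k1 x == 0))) k2 false := by
  rw [PySem.List.sorted2, PySem.List.sorted_eq_foldl_insertBy, PySem.List.sorted_eq_foldl_insertBy]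
  suffices H : ∀ (ys : List α) (A B : List α),
      (∀ x ∈ ys, k1 x = 0 ∨ k1 x = 1) → (∀ a ∈ A, k1 a = 0) → (∀ b ∈ B, k1 b = 1) →
      ys.foldl (fun acc x => PySem.List.insertBy
          (fun a b => decide (k1 a < k1 b) || (!decide (k1 b < k1 a) && decide (k2 a < k2 b))) x acc) (A ++ B)
        = (ys.filter (fun x => k1 x == 0)).foldl
            (fun acc x => PySem.List.insertBy (fun a b => decide (k2 a < k2 b)) x acc) A
          ++ (ys.filter (fun x => !(k1 x == 0))).foldl
            (fun acc x => PySem.List.insertBy (fun a b => decide (k2 a < k2 b)) x acc) B by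
    simpa using H xs [] [] h (by simp) (by simp)
  intro ys
  induction ys with
  | nil => intro A B _ _ _; simp
  | cons y ys ih =>
      intro A B hy hA hB
      have hy0 := hy y (by simp)
      rw [List.foldl_cons]
      rcases hy0 with h0 | h1
      · -- k1 y = 0 : y is inserted inside the first group
        have hBt : ∀ b ∈ B, (fun a b => decide (k1 a < k1 b) || (!decide (k1 b < k1 a) && decide (k2 a < k2 b))) y b = true := by
          intro b hb; simp [h0, hB b hb]
        rw [pv_insertBy_append_left _ _ _ _ hBt]
        rw [pv_insertBy_congr _ (fun a b => decide (k2 a < k2 b)) y A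
              (fun z hz => by simp [h0, hA z hz])]
        have hA' : ∀ a ∈ PySem.List.insertBy (fun a b => decide (k2 a < k2 b)) y A, k1 a = 0 := by
          intro a ha
          rcases (PySem.List.mem_insertBy _ _ _ _).mp ha with h' | h'
          · rw [h']; exact h0
          · exact hA a h'
        rw [ih _ _ (fun z hz => hy z (by simp [hz])) hA' hB]
        simp [h0]
      · -- k1 y = 1 : y is inserted inside the second group
        have hAf : ∀ a ∈ A, (fun a b => decide (k1 a < k1 b) || (!decide (k1 b < k1 a) && decide (k2 a < k2 b))) y a = false := by
          intro a ha; simp [h1, hA a ha]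
        rw [pv_insertBy_append_right _ _ _ _ hAf]
        rw [pv_insertBy_congr _ (fun a b => decide (k2 a < k2 b)) y B
              (fun z hz => by simp [h1, hB z hz])]
        have hB' : ∀ b ∈ PySem.List.insertBy (fun a b => decide (k2 a < k2 b)) y B, k1 b = 1 := by
          intro b hb
          rcases (PySem.List.mem_insertBy _ _ _ _).mp hb with h' | h'
          · rw [h']; exact h1
          · exact hB b h'
        rw [ih _ _ (fun z hz => hy z (by simp [hz])) hA hB']
        simp [h1]

-- ---- A's partition loop, characterised ----
theorem pv_partition (items : List (Int × String × String)) (a d : List String) :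
    items.foldl
      (fun (p : List String × List String) it =>
        if it.2.1 == "Across" then (p.1 ++ [pvFmt it], p.2) else (p.1, p.2 ++ [pvFmt it]))
      (a, d)
      = (a ++ (items.filter (fun it => it.2.1 == "Across")).map pvFmt,
         d ++ (items.filter (fun it => !(it.2.1 == "Across"))).map pvFmt) := by
  induction items generalizing a d with
  | nil => simp
  | cons it items ih =>
      rw [List.foldl_cons]
      by_cases h : (it.2.1 == "Across") = true
      · rw [if_pos h, ih]; simp [h]
      · rw [if_neg h, ih]; simp [h]

-- ---- B's emission loop, characterised ----
theorem pv_run_same (G : List (Int × String × String)) (res : List String) (f : Bool)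
    (h : ∀ g ∈ G, (g.2.1 == "Across") = f) :
    G.foldl pvStep (res, some f) = (res ++ G.map pvFmt, some f) := by
  induction G generalizing res with
  | nil => simp
  | cons g G' ih =>
      rw [List.foldl_cons]
      have hg := h g (by simp)
      have : pvStep (res, some f) g = (res ++ [pvFmt g], some f) := by
        simp [pvStep, hg]
      rw [this, ih _ (fun z hz => h z (by simp [hz]))]
      simp

theorem pv_run_new (G : List (Int × String × String)) (res : List String) (p : Option Bool) (f : Bool)
    (hne : G ≠ []) (h : ∀ g ∈ G, (g.2.1 == "Across") = f) (hp : p ≠ some f) :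
    G.foldl pvStep (res, p)
      = (res ++ (if f then "Across:" else "Down:") :: G.map pvFmt, some f) := by
  cases G with
  | nil => exact absurd rfl hne
  | cons g G' =>
      rw [List.foldl_cons]
      have hg := h g (by simp)
      have hstep : pvStep (res, p) g
          = (res ++ [if f then "Across:" else "Down:", pvFmt g], some f) := by
        simp [pvStep, hg, hp]
      rw [hstep, pv_run_same G' _ f (fun z hz => h z (by simp [hz]))]
      simp

theorem pv_emit (G0 G1 : List (Int × String × String))
    (h0 : ∀ g ∈ G0, (g.2.1 == "Across") = true) (h1 : ∀ g ∈ G1, (g.2.1 == "Across") = false) :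
    ((G0 ++ G1).foldl pvStep ([], none)).1
      = (if G0.isEmpty then [] else "Across:" :: G0.map pvFmt)
        ++ (if G1.isEmpty then [] else "Down:" :: G1.map pvFmt) := by
  rw [List.foldl_append]
  cases G0 with
  | nil =>
      cases G1 with
      | nil => simp
      | cons g G' =>
          rw [pv_run_new _ _ _ false (by simp) h1 (by simp)]
          simp
  | cons a G0' =>
      rw [pv_run_new _ _ _ true (by simp) h0 (by simp)]
      cases G1 with
      | nil => simp
      | cons g G' =>
          rw [pv_run_new _ _ _ false (by simp) h1 (by simp)]
          simp

-- ===== VERDICT (by name: the statement is the Claim_ definition above) =====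
theorem format_clue_solutions_spec : Claim_equal_format_clue_solutions := by
  intro solutions _
  unfold Spec_format_clue_solutions format_clue_solutions format_clue_solutions_alt
  dsimp only
  set items := (PySem.Dict.ofList solutions).items with hitems
  rw [pv_partition items [] []]
  dsimp only
  -- B: split the one compound-key sort into the two groups
  have hflag : ∀ x ∈ items, pvFlagB x = 0 ∨ pvFlagB x = 1 := by
    intro x _; unfold pvFlagB; split <;> simp
  rw [pv_sorted2_split pvFlagB (fun kv => pvKeyNum kv.1) items hflag]
  have hf0 : items.filter (fun x => pvFlagB x == 0) = items.filter (fun it => it.2.1 == "Across") := by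
    apply List.filter_congr
    intro x _
    by_cases h : (x.2.1 == "Across") = true <;> simp [pvFlagB, h]
  have hf1 : items.filter (fun x => !(pvFlagB x == 0)) = items.filter (fun it => !(it.2.1 == "Across")) := by
    apply List.filter_congr
    intro x _
    by_cases h : (x.2.1 == "Across") = true <;> simp [pvFlagB, h]
  rw [hf0, hf1]
  set fA := items.filter (fun it => it.2.1 == "Across") with hfA
  set fD := items.filter (fun it => !(it.2.1 == "Across")) with hfD
  set G0 := PySem.List.sorted fA (fun kv => pvKeyNum kv.1) false with hG0
  set G1 := PySem.List.sorted fD (fun kv => pvKeyNum kv.1) false with hG1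
  rw [pv_emit G0 G1
      (fun g hg => by
        have hm : g ∈ fA := (PySem.List.mem_sorted _ _ _ _).mp (hG0 ▸ hg)
        rw [hfA] at hm
        exact (List.mem_filter.mp hm).2)
      (fun g hg => by
        have hm : g ∈ fD := (PySem.List.mem_sorted _ _ _ _).mp (hG1 ▸ hg)
        rw [hfD] at hm
        simpa using (List.mem_filter.mp hm).2)]
  -- A's per-section sorted string lists are the mapped groups
  have hmap : ∀ l : List (Int × String × String),
      PySem.List.sorted (l.map pvFmt) pvKey false
        = (PySem.List.sorted l (fun kv => pvKeyNum kv.1) false).map pvFmt := by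
    intro l
    rw [← pv_sorted_map pvFmt pvKey l]
    rw [pv_sorted_key_congr (fun a => pvKey (pvFmt a)) (fun kv => pvKeyNum kv.1) l
        (fun x _ => pv_key_fmt x)]
  have hE0 : (fA.map pvFmt).isEmpty = G0.isEmpty := by
    rw [Bool.eq_iff_iff]
    simp [List.isEmpty_iff, hG0, PySem.List.sorted_eq_nil_iff]
  have hE1 : (fD.map pvFmt).isEmpty = G1.isEmpty := by
    rw [Bool.eq_iff_iff]
    simp [List.isEmpty_iff, hG1, PySem.List.sorted_eq_nil_iff]
  simp only [List.nil_append, hmap, hE0, hE1, ← hG0, ← hG1]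
  by_cases e0 : G0.isEmpty <;> by_cases e1 : G1.isEmpty <;> simp [e0, e1]
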